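-- pv_equiv track=rewrite | github.com/jjuanisima/TP-AyED1 | TP3/ej02.py | matriz_a
-- ===== SOURCE A (Python) =====
-- def matriz_a(n: int) -> list:
--     '''
--     Crea una matriz de N * N con números impares crecientes en la diagonal
--
--     Pre:
--         n (int): valor de n, que define el tamaño de la matriz
--     Post:
--         matriz (list): la matriz con los elementos modificados
--     '''
--
--     matriz = [[0] * n for i in range(n)]
--     num_impar = 1
--     for i in range(len(matriz)):
--         for j in range(len(matriz)):
--             if i == j:
--                 matriz[i][j] = num_impar
--                 num_impar += 2
--     return matriz
-- ===== SOURCE B (Python) =====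
-- def matriz_a(n: int) -> list:
--     '''
--     Crea una matriz de N * N con números impares crecientes en la diagonal
--     '''
--     matriz = []
--     for i in range(n):
--         matriz.append([0] * i + [2 * i + 1] + [0] * (n - i - 1))
--     return matriz
-- ===== Notes on version B (the rewrite author's own statement) =====
-- stated objective: alternative
-- what changed: Builds the matrix in one pass by assembling each row as a concatenation of two zero blocks around the closed-form odd diagonal value computed from the row index, instead of allocating a full zero matrix first and then mutating its diagonal with an odd-number accumulator inside a nested per-cell index scan guarded by an equality test.
import Mathlib
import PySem

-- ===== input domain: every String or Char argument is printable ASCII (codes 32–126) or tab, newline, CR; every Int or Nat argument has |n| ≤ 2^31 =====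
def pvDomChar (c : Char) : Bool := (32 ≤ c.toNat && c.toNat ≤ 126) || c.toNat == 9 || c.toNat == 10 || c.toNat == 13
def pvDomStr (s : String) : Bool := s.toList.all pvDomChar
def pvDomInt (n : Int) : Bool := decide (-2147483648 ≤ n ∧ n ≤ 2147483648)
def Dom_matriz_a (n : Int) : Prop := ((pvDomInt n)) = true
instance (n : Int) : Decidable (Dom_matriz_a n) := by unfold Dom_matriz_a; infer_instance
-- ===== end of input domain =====

-- B builds the matrix in one pass, assembling each row from two zero
-- blocks around the closed-form odd diagonal value, instead of mutating a zero matrix with an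
-- accumulator inside a nested per-cell scan (same return value).

-- ===== PORT A =====
-- matriz = [[0] * n for i in range(n)]; then nested index loops mutate the diagonal,
-- threading the accumulator num_impar; transliterated as a fold over (matrix, num_impar).
def matriz_a (n : Int) : List (List Int) :=
  let matriz : List (List Int) :=
    (PySem.List.pyRange 0 n 1).map (fun _ => List.replicate n.toNat (0 : Int))
  let st :=
    (PySem.List.pyRange 0 (matriz.length : Int) 1).foldl
      (fun (st : List (List Int) × Int) i =>
        (PySem.List.pyRange 0 ((st.1.length : Int)) 1).foldl
          (fun (st : List (List Int) × Int) j =>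
            if i == j then
              -- matriz[i][j] = num_impar; num_impar += 2
              (st.1.set i.toNat ((st.1.getD i.toNat []).set j.toNat st.2), st.2 + 2)
            else st)
          st)
      (matriz, 1)
  st.1

-- ===== PORT B =====
-- matriz = []; for i in range(n): matriz.append([0]*i + [2*i+1] + [0]*(n-i-1)); return matriz
def matriz_a_alt (n : Int) : List (List Int) :=
  (PySem.List.pyRange 0 n 1).foldl
    (fun (matriz : List (List Int)) i =>
      matriz ++ [List.replicate i.toNat (0 : Int) ++ [2 * i + 1]
                 ++ List.replicate (n - i - 1).toNat (0 : Int)])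
    []

-- ===== PRECONDITION & SPEC =====
def Spec_matriz_a (n : Int) (out : List (List Int)) : Prop := out = matriz_a_alt n
instance (n : Int) (out : List (List Int)) : Decidable (Spec_matriz_a n out) := by unfold Spec_matriz_a; infer_instance

-- ===== CLAIM (what is proved, stated in full; the proofs are below) =====
def Claim_equal_matriz_a : Prop := ∀ (n : Int), Dom_matriz_a n → Spec_matriz_a n (matriz_a n)

-- ===== LEMMAS AND PROOFS =====

-- the final row i of the matrix (for an m×m matrix)
def pvRow (m i : Nat) : List Int := (List.range m).map (fun j => if j = i then 2 * (i : Int) + 1 else 0)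

-- the matrix after the first k rows of the diagonal have been written
def pvMat (m k : Nat) : List (List Int) :=
  (List.range m).map (fun i => if i < k then pvRow m i else List.replicate m (0 : Int))

lemma pvMat_length (m k : Nat) : (pvMat m k).length = m := by simp [pvMat]

-- a fold whose step only acts at the element i: identity when i is absent
lemma pv_foldl_id {α β : Type} [DecidableEq β] (g : α → α) (i : β) (l : List β)
    (h : i ∉ l) (init : α) :
    l.foldl (fun st j => if i == j then g st else st) init = init := by
  induction l generalizing init with
  | nil => rfl
  | cons b t ih =>
    simp only [List.mem_cons, not_or] at h
    rw [List.foldl_cons, if_neg (by simp [h.1])]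
    exact ih h.2 init

-- …and applies g exactly once when i occurs (nodup list)
lemma pv_foldl_single {α β : Type} [DecidableEq β] (g : α → α) (i : β) (l : List β)
    (hl : l.Nodup) (init : α) :
    l.foldl (fun st j => if i == j then g st else st) init
      = if i ∈ l then g init else init := by
  induction l generalizing init with
  | nil => rfl
  | cons b t ih =>
    rcases List.nodup_cons.mp hl with ⟨hb, ht⟩
    by_cases hib : i = b
    · subst hib
      rw [List.foldl_cons, if_pos (by simp), pv_foldl_id g i t hb (g init)]
      simp [List.mem_cons]
    · rw [List.foldl_cons, if_neg (by simp [hib]), ih ht init]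
      simp [List.mem_cons, hib]

lemma pvMat_zero (m : Nat) : pvMat m 0 = (List.range m).map (fun _ => List.replicate m (0 : Int)) := by
  simp [pvMat]

lemma pvRow_from_set (m k : Nat) (hk : k < m) :
    (List.replicate m (0 : Int)).set k (2 * (k : Int) + 1) = pvRow m k := by
  apply List.ext_getElem
  · simp [pvRow]
  · intro i h1 h2
    simp only [pvRow, List.getElem_map, List.getElem_range] at *
    by_cases hik : i = k
    · subst hik
      simp [List.getElem_set_self]
    · rw [List.getElem_set_ne (by omega)]
      simp [hik]

lemma pvMat_set (m k : Nat) (hk : k < m) :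
    (pvMat m k).set k (pvRow m k) = pvMat m (k + 1) := by
  apply List.ext_getElem
  · simp [pvMat]
  · intro i h1 h2
    simp only [pvMat, List.length_map, List.length_range, List.length_set] at h1 h2
    by_cases hik : i = k
    · subst hik
      rw [List.getElem_set_self (by simp [pvMat]; omega)]
      simp [pvMat]
    · rw [List.getElem_set_ne (by omega)]
      simp only [pvMat, List.getElem_map, List.getElem_range]
      have : i < k ↔ i < k + 1 := by omega
      simp [this]

lemma pvMat_getD (m k : Nat) (hk : k < m) :
    (pvMat m k).getD k [] = List.replicate m (0 : Int) := by
  rw [List.getD_eq_getElem _ _ (by simp [pvMat_length]; omega)]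
  simp [pvMat]

-- one outer-loop step of A, from the invariant state
lemma pv_step (m k : Nat) (hk : k < m) :
    ((List.range (pvMat m k).length).map (fun j => ((j : Nat) : Int))).foldl
      (fun (st : List (List Int) × Int) j =>
        if ((k : Nat) : Int) == j then
          (st.1.set ((k : Nat) : Int).toNat
            ((st.1.getD ((k : Nat) : Int).toNat []).set j.toNat st.2), st.2 + 2)
        else st)
      (pvMat m k, 2 * (k : Int) + 1)
    = (pvMat m (k + 1), 2 * ((k : Int) + 1) + 1) := by
  rw [pvMat_length]
  have hfun : (fun (st : List (List Int) × Int) (j : Int) =>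
      if ((k : Nat) : Int) == j then
        (st.1.set ((k : Nat) : Int).toNat
          ((st.1.getD ((k : Nat) : Int).toNat []).set j.toNat st.2), st.2 + 2)
      else st)
    = (fun (st : List (List Int) × Int) (j : Int) =>
        if ((k : Nat) : Int) == j then
          (st.1.set k ((st.1.getD k []).set k st.2), st.2 + 2)
        else st) := by
    funext st j
    by_cases h : ((k : Nat) : Int) = j
    · subst h; simp
    · simp [h]
  have hnd : (((List.range m).map (fun j => ((j : Nat) : Int)))).Nodup :=
    (List.nodup_range).map Nat.cast_injective
  have hmem : ((k : Nat) : Int) ∈ (List.range m).map (fun j => ((j : Nat) : Int)) :=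
    List.mem_map.mpr ⟨k, List.mem_range.mpr hk, rfl⟩
  rw [hfun,
    pv_foldl_single (fun st : List (List Int) × Int =>
      (st.1.set k ((st.1.getD k []).set k st.2), st.2 + 2)) _ _ hnd _,
    if_pos hmem]
  simp only [pvMat_getD m k hk, pvRow_from_set m k hk, pvMat_set m k hk, Prod.mk.injEq]
  exact ⟨trivial, by ring⟩

-- the outer loop maintains the invariant (pvMat m k, 2k+1) over the first k rows
lemma pv_outer (m : Nat) (k : Nat) (hk : k ≤ m) :
    ((List.range k).map (fun i => ((i : Nat) : Int))).foldl
      (fun (st : List (List Int) × Int) i =>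
        ((List.range st.1.length).map (fun j => ((j : Nat) : Int))).foldl
          (fun (st : List (List Int) × Int) j =>
            if i == j then
              (st.1.set i.toNat ((st.1.getD i.toNat []).set j.toNat st.2), st.2 + 2)
            else st)
          st)
      (pvMat m 0, 1)
    = (pvMat m k, 2 * (k : Int) + 1) := by
  induction k with
  | zero => simp
  | succ k ih =>
    have hk' : k < m := by omega
    rw [List.range_succ, List.map_append, List.foldl_append, ih (by omega)]
    simp only [List.map_cons, List.map_nil, List.foldl_cons, List.foldl_nil]
    rw [pv_step m k hk']
    push_cast
    ring_nf

lemma pyRange_zero_cast (n : Int) :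
    PySem.List.pyRange 0 n 1 = (List.range n.toNat).map (fun i => ((i : Nat) : Int)) := by
  rw [PySem.List.pyRange_one]
  simp

lemma matriz_a_eq (n : Int) : matriz_a n = pvMat n.toNat n.toNat := by
  unfold matriz_a
  simp only [pyRange_zero_cast, Int.toNat_natCast, List.map_map, Function.comp_def,
    List.length_map, List.length_range]
  rw [← pvMat_zero]
  rw [pv_outer n.toNat n.toNat le_rfl]

-- B's concatenated row equals the per-index description of row k
lemma pvRowB_eq (n i : Int) (h0 : 0 ≤ i) (hn : i < n) :
    List.replicate i.toNat (0 : Int) ++ [2 * i + 1] ++ List.replicate (n - i - 1).toNat (0 : Int)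
      = pvRow n.toNat i.toNat := by
  apply List.ext_getElem
  · simp [pvRow]; omega
  · intro j h1 h2
    simp only [pvRow, List.getElem_map, List.getElem_range]
    rcases Nat.lt_trichotomy j i.toNat with hj | hj | hj
    · rw [List.getElem_append_left (by simp; omega),
        List.getElem_append_left (by simpa using hj)]
      simp [Nat.ne_of_lt hj]
    · subst hj
      rw [List.getElem_append_left (by simp),
        List.getElem_append_right (by simp)]
      simp [Int.toNat_of_nonneg h0]
    · rw [List.getElem_append_right (by simp; omega)]
      simp [Nat.ne_of_gt hj]

-- a foldl that appends f x for each x is a map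
lemma pv_foldl_map {α β : Type} (f : α → β) (l : List α) (acc : List β) :
    l.foldl (fun acc x => acc ++ [f x]) acc = acc ++ l.map f := by
  induction l generalizing acc with
  | nil => simp
  | cons a t ih => simp [ih]

lemma matriz_a_alt_eq (n : Int) : matriz_a_alt n = pvMat n.toNat n.toNat := by
  unfold matriz_a_alt
  rw [pyRange_zero_cast, pv_foldl_map]
  simp only [List.nil_append, List.map_map, Function.comp_def, pvMat]
  apply List.map_congr_left
  intro i hi
  rw [List.mem_range] at hi
  rw [if_pos hi]
  rw [show ((i : Nat) : Int).toNat = i by omega] at *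
  exact pvRowB_eq n i (by omega) (by omega)

-- ===== VERDICT (by name: the statement is the Claim_ definition above) =====
theorem matriz_a_spec : Claim_equal_matriz_a := by
  intro n _
  unfold Spec_matriz_a
  rw [matriz_a_eq, matriz_a_alt_eq]
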